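-- pv_equiv track=rewrite | github.com/adamdelcano/Tinkering-and-Tutorials | matrix_cells.py | allCellsDistOrder
-- ===== SOURCE A (Python) =====
-- from typing import List
--
-- def allCellsDistOrder(R: int, C: int, r0: int, c0: int) -> List[List[int]]:
--     """Given a matrix with R rows and C columns, with with integer
--     coordinates (r, c) where 0 <= r < R and 0 <= c < C, and a specific
--     cell in coordinates [r0, c0], returns a list of all cells in the
--     matrix sorted by distance (smallest to largest, column first)."""
--     matrix = []
--     # Max distance between two cells is R + C - 2, thus this hits 0->Max
--     for col_distance in range(0, (R + C - 1)):
--         row_distance = 0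
--         # Loop through every row + column permutation that == distance
--         while col_distance >= 0:
--             # These have to check if it's inside the bounds of the matrix
--             if c0 + col_distance < C:  # Column ceiling
--                 if r0 + row_distance < R:  # Row ceiling
--                     matrix.append([r0 + row_distance, c0 + col_distance])
--                 if row_distance and r0 - row_distance >= 0:  # Row floor
--                     matrix.append([r0 - row_distance, c0 + col_distance])
--             if col_distance and c0 - col_distance >= 0:  # Column floor
--                 if r0 + row_distance < R:  # Row ceiling
--                     matrix.append([r0 + row_distance, c0 - col_distance])
--                 if row_distance and r0 - row_distance >= 0:  # Row floor
--                     matrix.append([r0 - row_distance, c0 - col_distance])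
--             col_distance -= 1
--             row_distance += 1
--     return matrix
-- ===== SOURCE B (Python) =====
-- def allCellsDistOrder(R, C, r0, c0):
--     """Anti-diagonal bucketing: iterate offset pairs row-offset-major
--     (both offset ranges clipped to offsets that can produce an
--     in-bounds cell, row data hoisted out of the inner loop), drop each
--     (up to 4-cell) mirror group into a per-distance bucket, then
--     concatenate the buckets.  Same output order as the distance-major
--     sweep because within one distance the row offset also increases."""
--     n = R + C - 1
--     hr = max(R - 1 - r0, r0)
--     hc = max(C - 1 - c0, c0)
--     buckets = [[] for _ in range(n)]
--     for rd in range(min(n, hr + 1)):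
--         rp, rm = r0 + rd, r0 - rd
--         up = rp < R
--         dn = rd > 0 and rm >= 0
--         for cd in range(min(n - rd, hc + 1)):
--             b = buckets[rd + cd]
--             cp, cm = c0 + cd, c0 - cd
--             if cp < C:
--                 if up:
--                     b.append([rp, cp])
--                 if dn:
--                     b.append([rm, cp])
--             if cd and cm >= 0:
--                 if up:
--                     b.append([rp, cm])
--                 if dn:
--                     b.append([rm, cm])
--     return [cell for b in buckets for cell in b]
-- ===== Notes on version B (the rewrite author's own statement) =====
-- stated objective: alternative
-- what changed: B replaces A's distance-major sweep (appending directly to one output list) by a row-offset-major traversal of offset pairs, clipped to the offset ranges that can yield a cell and with the row data hoisted out of the inner loop, emitting each mirror group into a per-Manhattan-distance bucket and concatenating the buckets at the end; the order coincides because within one distance the row offset increases as the column offset decreases. …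
import Mathlib
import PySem

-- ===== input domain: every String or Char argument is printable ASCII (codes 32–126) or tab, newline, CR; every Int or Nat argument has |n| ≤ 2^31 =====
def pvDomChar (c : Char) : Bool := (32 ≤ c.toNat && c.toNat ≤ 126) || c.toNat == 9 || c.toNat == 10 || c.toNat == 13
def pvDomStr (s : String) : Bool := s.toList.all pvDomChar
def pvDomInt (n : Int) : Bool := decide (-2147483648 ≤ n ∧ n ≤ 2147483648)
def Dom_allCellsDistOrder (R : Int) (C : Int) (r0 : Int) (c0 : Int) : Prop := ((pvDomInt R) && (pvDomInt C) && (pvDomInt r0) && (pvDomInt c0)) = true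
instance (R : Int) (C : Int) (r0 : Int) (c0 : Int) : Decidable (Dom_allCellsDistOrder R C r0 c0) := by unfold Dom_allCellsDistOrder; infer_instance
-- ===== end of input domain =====

-- B replaces A's distance-major sweep by a clipped row-offset-major traversal into per-distance buckets (same output by a different traversal; no across-the-board speed factor is claimed).

-- ===== PORT A =====
-- body of A's inner while loop (the four guarded appends), cd = col_distance, rd = row_distance
def emitA (R C r0 c0 cd rd : Int) (acc : List (List Int)) : List (List Int) :=
  let acc1 :=
    if c0 + cd < C then
      let a := if r0 + rd < R then acc ++ [[r0 + rd, c0 + cd]] else acc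
      if rd ≠ 0 ∧ 0 ≤ r0 - rd then a ++ [[r0 - rd, c0 + cd]] else a
    else acc
  if cd ≠ 0 ∧ 0 ≤ c0 - cd then
    let a := if r0 + rd < R then acc1 ++ [[r0 + rd, c0 - cd]] else acc1
    if rd ≠ 0 ∧ 0 ≤ r0 - rd then a ++ [[r0 - rd, c0 - cd]] else a
  else acc1

-- A's inner while loop: while col_distance >= 0
def innerA (R C r0 c0 : Int) (cd rd : Int) (acc : List (List Int)) : List (List Int) :=
  if h : 0 ≤ cd then innerA R C r0 c0 (cd - 1) (rd + 1) (emitA R C r0 c0 cd rd acc)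
  else acc
termination_by (cd + 1).toNat
decreasing_by omega

def allCellsDistOrder (R : Int) (C : Int) (r0 : Int) (c0 : Int) : List (List Int) :=
  (PySem.List.pyRange 0 (R + C - 1) 1).foldl
    (fun acc d => innerA R C r0 c0 d 0 acc) []

-- ===== PORT B =====
-- Source B's inner-loop body: append the in-bounds mirror cells of one offset pair to bucket g
-- (rp/rm/up/dn are the row values and row flags Source B hoists out of the inner loop)
def emitPair (C c0 : Int) (rp rm : Int) (up dn : Bool) (cd : Int) (g : List (List Int)) : List (List Int) :=
  let cp := c0 + cd
  let cm := c0 - cd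
  let g1 :=
    if cp < C then
      let a := if up then g ++ [[rp, cp]] else g
      if dn then a ++ [[rm, cp]] else a
    else g
  if cd ≠ 0 ∧ 0 ≤ cm then
    let a := if up then g1 ++ [[rp, cm]] else g1
    if dn then a ++ [[rm, cm]] else a
  else g1

def allCellsDistOrder_alt (R : Int) (C : Int) (r0 : Int) (c0 : Int) : List (List Int) :=
  let n := R + C - 1
  let hr := max (R - 1 - r0) r0
  let hc := max (C - 1 - c0) c0
  let buckets0 : List (List (List Int)) := (PySem.List.pyRange 0 n 1).map (fun _ => [])
  let buckets :=
    (PySem.List.pyRange 0 (min n (hr + 1)) 1).foldl (fun bs rd =>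
      let rp := r0 + rd
      let rm := r0 - rd
      let up := decide (rp < R)
      let dn := decide (0 < rd) && decide (0 ≤ rm)
      (PySem.List.pyRange 0 (min (n - rd) (hc + 1)) 1).foldl (fun bs cd =>
        bs.modify (rd + cd).toNat (emitPair C c0 rp rm up dn cd)) bs) buckets0
  buckets.foldl (fun acc b => acc ++ b) []

-- ===== PRECONDITION & SPEC =====
def Spec_allCellsDistOrder (R : Int) (C : Int) (r0 : Int) (c0 : Int) (out : List (List Int)) : Prop := out = allCellsDistOrder_alt R C r0 c0
instance (R : Int) (C : Int) (r0 : Int) (c0 : Int) (out : List (List Int)) : Decidable (Spec_allCellsDistOrder R C r0 c0 out) := by unfold Spec_allCellsDistOrder; infer_instance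

-- ===== CLAIM (what is proved, stated in full; the proofs are below) =====
def Claim_equal_allCellsDistOrder : Prop := ∀ (R : Int) (C : Int) (r0 : Int) (c0 : Int), Dom_allCellsDistOrder R C r0 c0 → Spec_allCellsDistOrder R C r0 c0 (allCellsDistOrder R C r0 c0)

-- ===== LEMMAS AND PROOFS =====

-- the mirror group of an offset pair, as a pure list (cd = column offset, rd = row offset)
def groupL (R C r0 c0 cd rd : Int) : List (List Int) :=
  ((if c0 + cd < C then
      (if r0 + rd < R then [[r0 + rd, c0 + cd]] else []) ++
      (if rd ≠ 0 ∧ 0 ≤ r0 - rd then [[r0 - rd, c0 + cd]] else [])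
    else []) ++
   (if cd ≠ 0 ∧ 0 ≤ c0 - cd then
      (if r0 + rd < R then [[r0 + rd, c0 - cd]] else []) ++
      (if rd ≠ 0 ∧ 0 ≤ r0 - rd then [[r0 - rd, c0 - cd]] else [])
    else []))

theorem emitA_eq (R C r0 c0 cd rd : Int) (acc : List (List Int)) :
    emitA R C r0 c0 cd rd acc = acc ++ groupL R C r0 c0 cd rd := by
  unfold emitA groupL
  split_ifs <;> simp

theorem emitPair_eq (R C r0 c0 rd cd : Int) (hrd : 0 ≤ rd) (g : List (List Int)) :
    emitPair C c0 (r0 + rd) (r0 - rd) (decide (r0 + rd < R))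
      (decide (0 < rd) && decide (0 ≤ r0 - rd)) cd g
    = g ++ groupL R C r0 c0 cd rd := by
  simp only [emitPair, groupL, Bool.and_eq_true, decide_eq_true_eq]
  split_ifs <;> simp_all <;> omega

-- group of the offset pair with Nat offsets (rd = row offset, cd = column offset)
def groupN (R C r0 c0 : Int) (rd cd : Nat) : List (List Int) :=
  groupL R C r0 c0 (cd : Int) (rd : Int)

-- the ring at distance d, row offset j ascending — exactly what A's inner loop emits at d
def ringA (R C r0 c0 : Int) (d : Nat) : List (List Int) :=
  (List.range (d + 1)).flatMap (fun (j : Nat) => groupN R C r0 c0 j (d - j))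

theorem innerA_eq (R C r0 c0 : Int) :
    ∀ (m : Nat) (rd : Nat) (acc : List (List Int)),
      innerA R C r0 c0 (m : Int) (rd : Int) acc
        = acc ++ (List.range (m + 1)).flatMap
            (fun (j : Nat) => groupN R C r0 c0 (rd + j) (m - j)) := by
  intro m
  induction m with
  | zero =>
    intro rd acc
    rw [innerA, dif_pos (by omega : (0:Int) ≤ ((0:Nat) : Int))]
    rw [innerA, dif_neg (by omega)]
    simp [emitA_eq, groupN]
  | succ m ih =>
    intro rd acc
    rw [innerA, dif_pos (by omega : (0:Int) ≤ ((m + 1 : Nat) : Int))]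
    have hc : ((m + 1 : Nat) : Int) - 1 = ((m : Nat) : Int) := by push_cast; ring
    have hr : ((rd : Nat) : Int) + 1 = ((rd + 1 : Nat) : Int) := by push_cast; ring
    rw [hc, hr, ih (rd + 1), emitA_eq]
    conv_rhs => rw [show m + 1 + 1 = (m + 1).succ from rfl, List.range_succ_eq_map]
    simp only [List.flatMap_cons, List.flatMap_map]
    have hf : (fun (a : Nat) => groupN R C r0 c0 (rd + a.succ) (m + 1 - a.succ))
        = (fun (a : Nat) => groupN R C r0 c0 (rd + 1 + a) (m - a)) := by
      funext a
      have e1 : rd + a.succ = rd + 1 + a := by omega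
      have e2 : m + 1 - a.succ = m - a := by omega
      rw [e1, e2]
    rw [hf]
    have hg : groupN R C r0 c0 (rd + 0) (m + 1 - 0) = groupL R C r0 c0 ((m + 1 : Nat) : Int) ((rd : Nat) : Int) := by
      simp [groupN]
    rw [hg]
    simp [List.append_assoc]

theorem inner_fold_getElem? (R C r0 c0 : Int) (k : Nat) :
    ∀ (m : Nat) (bs : List (List (List Int))) (i : Nat),
      ((List.range m).foldl
        (fun bs (cd : Nat) => bs.modify (k + cd) (fun g => g ++ groupN R C r0 c0 k cd)) bs)[i]?
      = if k ≤ i ∧ i < k + m then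
          bs[i]?.map (fun g => g ++ groupN R C r0 c0 k (i - k))
        else bs[i]? := by
  intro m
  induction m with
  | zero => intro bs i; simp
  | succ m ih =>
    intro bs i
    rw [List.range_succ, List.foldl_append]
    simp only [List.foldl_cons, List.foldl_nil]
    rw [List.getElem?_modify]
    by_cases hi : k + m = i
    · subst hi
      rw [ih, if_neg (by omega), if_pos (by omega)]
      have h2 : (k + m - k : Nat) = m := by omega
      rw [h2]
      cases bs[k + m]? <;> simp
    · rw [ih]
      by_cases h1 : k ≤ i ∧ i < k + m
      · rw [if_pos h1, if_pos (by omega)]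
        cases bs[i]? <;> simp_all
      · rw [if_neg h1, if_neg (by omega)]
        cases bs[i]? <;> simp_all

-- partial bucket state: the buckets after the first k outer (row-offset) iterations
def bstate (R C r0 c0 : Int) (k N : Nat) : List (List (List Int)) :=
  (List.range N).map (fun (d : Nat) =>
    (List.range (min k (d + 1))).flatMap (fun (rd : Nat) => groupN R C r0 c0 rd (d - rd)))

theorem bstate_step (R C r0 c0 : Int) (N k : Nat) (hk : k < N) :
    (List.range (N - k)).foldl
      (fun bs (cd : Nat) => bs.modify (k + cd) (fun g => g ++ groupN R C r0 c0 k cd))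
      (bstate R C r0 c0 k N)
    = bstate R C r0 c0 (k + 1) N := by
  apply List.ext_getElem?
  intro i
  rw [inner_fold_getElem?]
  unfold bstate
  by_cases hiN : i < N
  · simp only [List.getElem?_map, List.getElem?_range hiN, Option.map_some]
    by_cases hki : k ≤ i
    · rw [if_pos (by omega)]
      congr 1
      have h1 : min k (i + 1) = k := by omega
      have h2 : min (k + 1) (i + 1) = k + 1 := by omega
      rw [h1, h2, List.range_succ, List.flatMap_append]
      simp [groupN]
    · rw [if_neg (by omega)]
      have h3 : min k (i + 1) = min (k + 1) (i + 1) := by omega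
      rw [h3]
  · rw [if_neg (by omega)]
    rw [List.getElem?_eq_none (by simp; omega), List.getElem?_eq_none (by simp; omega)]

theorem bstate_full (R C r0 c0 : Int) (N : Nat) :
    ∀ (j : Nat), j ≤ N →
      (List.range j).foldl
        (fun bs (k : Nat) =>
          (List.range (N - k)).foldl
            (fun bs (cd : Nat) => bs.modify (k + cd) (fun g => g ++ groupN R C r0 c0 k cd)) bs)
        (bstate R C r0 c0 0 N)
      = bstate R C r0 c0 j N := by
  intro j
  induction j with
  | zero => intro _; simp
  | succ j ih =>
    intro hj
    rw [List.range_succ, List.foldl_append]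
    simp only [List.foldl_cons, List.foldl_nil]
    rw [ih (by omega), bstate_step R C r0 c0 N j (by omega)]

-- outside the clipped offset ranges the mirror group is empty
theorem groupL_nil (R C r0 c0 cd rd : Int)
    (h : max (R - 1 - r0) r0 < rd ∨ max (C - 1 - c0) c0 < cd) :
    groupL R C r0 c0 cd rd = [] := by
  unfold groupL
  split_ifs <;> simp_all <;> omega

theorem modify_append_nil (i : Nat) (bs : List (List (List Int))) :
    bs.modify i (fun g => g ++ ([] : List (List Int))) = bs := by
  have h : (fun g : List (List Int) => g ++ ([] : List (List Int))) = id := funext fun g => by simp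
  rw [h, List.modify_id]

-- dropping trailing no-op iterations of a fold over a range
theorem foldl_range_ext {α : Type} (f : α → Nat → α) (M' M : Nat) (h : M' ≤ M)
    (hid : ∀ (a : α) (x : Nat), M' ≤ x → x < M → f a x = a) (init : α) :
    (List.range M).foldl f init = (List.range M').foldl f init := by
  obtain ⟨e, rfl⟩ : ∃ e, M = M' + e := ⟨M - M', by omega⟩
  rw [List.range_add, List.foldl_append, List.foldl_map]
  rw [PySem.List.foldl_congr_mem _ _ (fun a _ => a) _
    (by
      intro a x hx
      exact hid a (M' + x) (by omega) (by simp at hx; omega))]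
  exact List.foldl_fixed _

-- a whole inner pass is a no-op once the row offset is out of range
theorem inner_noop (R C r0 c0 : Int) (k : Nat) (hk : max (R - 1 - r0) r0 < (k : Int)) (m : Nat)
    (bs : List (List (List Int))) :
    (List.range m).foldl
      (fun bs (cd : Nat) => bs.modify (k + cd) (fun g => g ++ groupN R C r0 c0 k cd)) bs = bs := by
  rw [PySem.List.foldl_congr_mem _ _ (fun bs _ => bs) _
    (by
      intro bs' cd _
      rw [groupN, groupL_nil R C r0 c0 (cd : Int) (k : Int) (Or.inl hk), modify_append_nil])]
  exact List.foldl_fixed _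

-- Nat-world form of B's nested bucket fold
theorem alt_fold_eq (R C r0 c0 : Int) (hn : 0 ≤ R + C - 1) :
    ((PySem.List.pyRange 0 (min (R + C - 1) (max (R - 1 - r0) r0 + 1)) 1).foldl (fun bs rd =>
        (PySem.List.pyRange 0 (min ((R + C - 1) - rd) (max (C - 1 - c0) c0 + 1)) 1).foldl (fun bs cd =>
          bs.modify (rd + cd).toNat
            (emitPair C c0 (r0 + rd) (r0 - rd) (decide (r0 + rd < R))
              (decide (0 < rd) && decide (0 ≤ r0 - rd)) cd)) bs)
      ((PySem.List.pyRange 0 (R + C - 1) 1).map (fun _ => ([] : List (List Int)))))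
    = bstate R C r0 c0 (R + C - 1).toNat (R + C - 1).toNat := by
  have h0 : (PySem.List.pyRange 0 (R + C - 1) 1).map (fun _ => ([] : List (List Int)))
      = bstate R C r0 c0 0 (R + C - 1).toNat := by
    rw [PySem.List.pyRange_one]
    simp [bstate, List.map_map, Function.comp_def, List.map_const']
  rw [h0, PySem.List.pyRange_one]
  rw [List.foldl_map]
  refine Eq.trans (PySem.List.foldl_congr_mem _ _
    (fun bs (k : Nat) =>
      (List.range ((R + C - 1).toNat - k)).foldl
        (fun bs (cd : Nat) => bs.modify (k + cd) (fun g => g ++ groupN R C r0 c0 k cd)) bs)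
    _ ?_) ?_
  · -- each outer iteration: Python inner fold = full-range Nat inner fold
    intro bs k _
    simp only [zero_add]
    rw [PySem.List.pyRange_one]
    rw [List.foldl_map]
    refine Eq.trans (PySem.List.foldl_congr_mem _ _
      (fun bs (cd : Nat) => bs.modify (k + cd) (fun g => g ++ groupN R C r0 c0 k cd)) _ ?_) ?_
    · intro bs' cd _
      simp only [zero_add]
      have h1 : (((k : Nat) : Int) + ((cd : Nat) : Int)).toNat = k + cd := by omega
      rw [h1]
      congr 1
      funext g
      rw [emitPair_eq R C r0 c0 ((k : Nat) : Int) ((cd : Nat) : Int) (by omega), groupN]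
    · -- extend the clipped column range to the full one: the tail is out of bounds
      refine Eq.symm (foldl_range_ext _ _ ((R + C - 1).toNat - k) ?_ ?_ bs)
      · omega
      · intro bs' cd h1 h2
        rw [groupN, groupL_nil R C r0 c0 (cd : Int) (k : Int) (Or.inr (by omega)), modify_append_nil]
  · -- extend the clipped row range to the full one, then run the bucket-fill invariant
    refine Eq.trans (Eq.symm (foldl_range_ext _ _ ((R + C - 1).toNat) ?_ ?_ (bstate R C r0 c0 0 (R + C - 1).toNat))) ?_
    · omega
    · intro bs k h1 h2
      exact inner_noop R C r0 c0 k (by omega) _ bs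
    · exact bstate_full R C r0 c0 (R + C - 1).toNat (R + C - 1).toNat le_rfl

theorem bstate_final (R C r0 c0 : Int) (N : Nat) :
    bstate R C r0 c0 N N = (List.range N).map (ringA R C r0 c0) := by
  apply List.ext_getElem?
  intro i
  unfold bstate ringA
  by_cases hi : i < N
  · simp only [List.getElem?_map, List.getElem?_range hi, Option.map_some]
    have h1 : min N (i + 1) = i + 1 := by omega
    rw [h1]
  · rw [List.getElem?_eq_none (by simp; omega), List.getElem?_eq_none (by simp; omega)]

-- ===== VERDICT (by name: the statement is the Claim_ definition above) =====
theorem allCellsDistOrder_spec : Claim_equal_allCellsDistOrder := by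
  intro R C r0 c0 _
  unfold Spec_allCellsDistOrder
  simp only [allCellsDistOrder, allCellsDistOrder_alt]
  by_cases h : R + C - 1 ≤ 0
  · rw [PySem.List.pyRange_one_eq_nil h,
      PySem.List.pyRange_one_eq_nil (le_trans (min_le_left _ _) h)]
    simp
  · have hn : 0 ≤ R + C - 1 := by omega
    rw [alt_fold_eq R C r0 c0 hn, bstate_final, PySem.List.foldl_append_eq_flatten,
      List.nil_append, ← List.flatMap_def]
    rw [PySem.List.pyRange_one]
    simp only [Int.sub_zero, zero_add]
    rw [List.foldl_map]
    rw [PySem.List.foldl_congr_mem _ _ (fun acc (k : Nat) => acc ++ ringA R C r0 c0 k) _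
      (by
        intro acc k _
        have h0 : ((k : Nat) : Int) = ((k : Nat) : Int) := rfl
        have := innerA_eq R C r0 c0 k 0 acc
        simpa [ringA] using this)]
    rw [PySem.List.foldl_append_eq_flatMap]
    simp
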